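-- pv_equiv track=rewrite | github.com/jooaosanntos/python | p1ufcg/minitestes/5miniteste/u6/colapsaNmenores/sol1.py | encontrar_menor
-- ===== SOURCE A (Python) =====
-- def encontrar_menor(lista_numeros):
--     menor = lista_numeros[0]
--     indice_menor = 0
--     for indice in range(1, len(lista_numeros)):
--         if menor > lista_numeros[indice]:
--             menor = lista_numeros[indice]
--             indice_menor = indice
--
--     lista_numeros.pop(indice_menor)
--     return menor
-- ===== SOURCE B (Python) =====
-- def encontrar_menor(lista_numeros):
--     # Divide-and-conquer tournament: find (minimum, first index of minimum)
--     # over lista_numeros[lo:hi] by halving; ties prefer the left half.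
--     def menor_em(lo, hi):
--         if hi - lo <= 1:
--             return lista_numeros[lo], lo
--         mid = (lo + hi) // 2
--         m1, i1 = menor_em(lo, mid)
--         m2, i2 = menor_em(mid, hi)
--         return (m1, i1) if m1 <= m2 else (m2, i2)
--     menor, indice = menor_em(0, len(lista_numeros))
--     lista_numeros.pop(indice)
--     return menor
-- ===== Notes on version B (the rewrite author's own statement) =====
-- stated objective: alternative
-- what changed: Replaces A's single left-to-right index-tracking scan with a divide-and-conquer tournament that halves the interval and combines (min, first-index) pairs preferring the left half on ties, then pops that index; same value and mutation.
import Mathlib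
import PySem

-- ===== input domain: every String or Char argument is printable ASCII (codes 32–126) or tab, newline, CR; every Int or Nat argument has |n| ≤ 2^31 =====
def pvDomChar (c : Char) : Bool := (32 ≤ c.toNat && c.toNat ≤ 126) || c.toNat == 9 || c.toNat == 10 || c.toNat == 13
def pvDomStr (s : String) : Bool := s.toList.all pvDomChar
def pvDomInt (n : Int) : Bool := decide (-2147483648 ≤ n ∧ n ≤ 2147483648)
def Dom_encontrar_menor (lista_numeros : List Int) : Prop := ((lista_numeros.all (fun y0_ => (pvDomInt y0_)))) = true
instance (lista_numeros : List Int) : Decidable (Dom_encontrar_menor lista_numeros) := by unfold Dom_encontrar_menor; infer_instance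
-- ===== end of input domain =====

-- B replaces A's left-to-right index-tracking scan with a divide-and-conquer tournament
-- (halve the interval, combine (min, first index) pairs, ties prefer the left half), then
-- pops that index; both mutate the argument identically (first occurrence of the minimum
-- removed); the equivalence proved here is about the return value.

-- ===== PORT A =====
def encontrar_menor (lista_numeros : List Int) : Int :=
  let menor := PySem.List.pyGetD lista_numeros 0 0
  let st := (PySem.List.pyRange 1 lista_numeros.length 1).foldl
    (fun (st : Int × Int) indice =>
      if st.1 > PySem.List.pyGetD lista_numeros indice 0 then
        (PySem.List.pyGetD lista_numeros indice 0, indice)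
      else st)
    (menor, 0)
  -- lista_numeros.pop(indice_menor) mutates the argument; the return value is menor
  st.1

-- ===== PORT B =====
-- menor_em(lo, hi): tournament minimum of lista_numeros[lo:hi] with its first index.
def pvMenorEm (xs : List Int) (lo hi : Nat) : Int × Nat :=
  if hi - lo ≤ 1 then (PySem.List.pyGetD xs (lo : Int) 0, lo)
  else
    let mid := (lo + hi) / 2
    let p1 := pvMenorEm xs lo mid
    let p2 := pvMenorEm xs mid hi
    if p1.1 ≤ p2.1 then p1 else p2
termination_by hi - lo
decreasing_by all_goals omega

def encontrar_menor_alt (lista_numeros : List Int) : Int :=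
  -- lista_numeros.pop(indice) mutates the argument; the return value is menor
  (pvMenorEm lista_numeros 0 lista_numeros.length).1

-- ===== PRECONDITION & SPEC =====
-- Both A and B raise IndexError on the empty list: excluded.
def Pre_encontrar_menor (lista_numeros : List Int) : Prop := lista_numeros ≠ []
instance (lista_numeros : List Int) : Decidable (Pre_encontrar_menor lista_numeros) := by unfold Pre_encontrar_menor; infer_instance
def pvWitness_encontrar_menor : List Int := [3, -1, 4, -1, 5]

def Spec_encontrar_menor (lista_numeros : List Int) (out : Int) : Prop := out = encontrar_menor_alt lista_numeros
instance (lista_numeros : List Int) (out : Int) : Decidable (Spec_encontrar_menor lista_numeros out) := by unfold Spec_encontrar_menor; infer_instance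

-- ===== CLAIM (what is proved, stated in full; the proofs are below) =====
def Claim_equal_encontrar_menor : Prop := ∀ (lista_numeros : List Int), Dom_encontrar_menor lista_numeros → Pre_encontrar_menor lista_numeros → Spec_encontrar_menor lista_numeros (encontrar_menor lista_numeros)

-- ===== LEMMAS AND PROOFS =====

-- A's index loop over pre ++ xs, starting at index pre.length, computes foldl min over xs in its
-- first component.
theorem pv_fold_min (xs pre : List Int) (st : Int × Int) :
    ((PySem.List.pyRange pre.length (pre.length + xs.length) 1).foldl
      (fun (st : Int × Int) indice =>
        if st.1 > PySem.List.pyGetD (pre ++ xs) indice 0 then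
          (PySem.List.pyGetD (pre ++ xs) indice 0, indice)
        else st)
      st).1 = xs.foldl min st.1 := by
  induction xs generalizing pre st with
  | nil => simp [PySem.List.pyRange_one_eq_nil]
  | cons a l ih =>
    rw [PySem.List.pyRange_one_cons (by simp)]
    have hget : PySem.List.pyGetD (pre ++ a :: l) (pre.length : Int) 0 = a := by
      simp
    simp only [List.foldl_cons, hget]
    have hrec := ih (pre ++ [a]) (if st.1 > a then (a, (pre.length : Int)) else st)
    simp only [List.append_assoc, List.singleton_append, List.length_append,
      List.length_singleton] at hrec
    have hr : PySem.List.pyRange ((pre.length : Int) + 1)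
          ((pre.length : Int) + ((a :: l).length : Int)) 1
        = PySem.List.pyRange (((pre.length + 1 : Nat)) : Int)
          (((pre.length + 1 : Nat) : Int) + (l.length : Int)) 1 := by
      congr 1; · simp; ring
    rw [hr, hrec]
    split_ifs with h
    · rw [min_def, if_neg (by omega)]
    · rw [min_def, if_pos (by omega)]

-- foldl min is a lower bound on x :: t …
theorem pv_foldl_min_le (t : List Int) (x : Int) : ∀ a ∈ x :: t, t.foldl min x ≤ a := by
  induction t generalizing x with
  | nil => intro a ha; simp at ha; simp [ha]
  | cons b l ih =>
    intro a ha
    simp only [List.foldl_cons]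
    rcases List.mem_cons.1 ha with h | h
    · subst h
      calc l.foldl min (min a b) ≤ min a b := ih (min a b) _ List.mem_cons_self
        _ ≤ a := min_le_left _ _
    · rcases List.mem_cons.1 h with h | h
      · subst h
        calc l.foldl min (min x a) ≤ min x a := ih (min x a) _ List.mem_cons_self
          _ ≤ a := min_le_right _ _
      · exact ih (min x b) a (List.mem_cons_of_mem _ h)

-- … and a member of x :: t.
theorem pv_foldl_min_mem (t : List Int) (x : Int) : t.foldl min x ∈ x :: t := by
  induction t generalizing x with
  | nil => simp
  | cons b l ih =>
    simp only [List.foldl_cons]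
    rcases List.mem_cons.1 (ih (min x b)) with h | h
    · rw [h, min_def]; split_ifs <;> simp
    · simp [h]

-- B's tournament value is a member of the segment …
theorem pv_menorEm_mem (xs : List Int) (lo hi : Nat) (hlo : lo < hi) (hhi : hi ≤ xs.length) :
    ∃ j, lo ≤ j ∧ j < hi ∧ (pvMenorEm xs lo hi).1 = xs.getD j 0 := by
  rw [pvMenorEm]
  split_ifs with h
  · refine ⟨lo, le_refl _, hlo, ?_⟩
    rw [PySem.List.pyGetD_natCast, List.getD_eq_getElem?_getD]
  · have h2 : 2 ≤ hi - lo := by omega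
    obtain ⟨j1, hj1a, hj1b, hj1c⟩ := pv_menorEm_mem xs lo ((lo + hi) / 2) (by omega) (by omega)
    obtain ⟨j2, hj2a, hj2b, hj2c⟩ := pv_menorEm_mem xs ((lo + hi) / 2) hi (by omega) hhi
    dsimp only
    split_ifs
    · exact ⟨j1, hj1a, by omega, hj1c⟩
    · exact ⟨j2, by omega, hj2b, hj2c⟩
termination_by hi - lo
decreasing_by all_goals omega

-- … and a lower bound on the segment.
theorem pv_menorEm_le (xs : List Int) (lo hi j : Nat) (hj1 : lo ≤ j) (hj2 : j < hi)
    (hhi : hi ≤ xs.length) : (pvMenorEm xs lo hi).1 ≤ xs.getD j 0 := by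
  rw [pvMenorEm]
  split_ifs with h
  · have : j = lo := by omega
    subst this
    rw [PySem.List.pyGetD_natCast, List.getD_eq_getElem?_getD]
  · dsimp only
    by_cases hj : j < (lo + hi) / 2
    · have h1 := pv_menorEm_le xs lo ((lo + hi) / 2) j hj1 hj (by omega)
      split_ifs with hle
      · exact h1
      · exact le_trans (by omega) h1
    · have h2 := pv_menorEm_le xs ((lo + hi) / 2) hi j (by omega) hj2 hhi
      split_ifs with hle
      · exact le_trans hle h2
      · exact h2
termination_by hi - lo
decreasing_by all_goals omega

-- membership ↔ getD with an in-range index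
theorem pv_mem_getD (xs : List Int) (a : Int) (ha : a ∈ xs) :
    ∃ j, j < xs.length ∧ xs.getD j 0 = a := by
  obtain ⟨j, hj, hget⟩ := List.mem_iff_getElem.1 ha
  exact ⟨j, hj, by rw [List.getD_eq_getElem?_getD, List.getElem?_eq_getElem hj]; simpa⟩

theorem pv_getD_mem (xs : List Int) (j : Nat) (hj : j < xs.length) : xs.getD j 0 ∈ xs := by
  rw [List.getD_eq_getElem?_getD, List.getElem?_eq_getElem hj]
  exact List.getElem_mem hj

-- ===== VERDICT (by name: the statement is the Claim_ definition above) =====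
theorem encontrar_menor_spec : Claim_equal_encontrar_menor := by
  intro xs _ hpre
  unfold Spec_encontrar_menor encontrar_menor encontrar_menor_alt
  obtain ⟨x, t, rfl⟩ := List.exists_cons_of_ne_nil hpre
  have h := pv_fold_min t [x] (x, 0)
  simp only [List.length_singleton, List.singleton_append] at h
  have hr : PySem.List.pyRange (1 : Int) (((x :: t).length : Int)) 1
      = PySem.List.pyRange (((1 : Nat)) : Int) (((1 : Nat) : Int) + (t.length : Int)) 1 := by
    congr 1; · simp; ring
  simp only [PySem.List.pyGetD_zero_cons, hr, h]
  -- both sides are the minimum of x :: t; conclude by antisymmetry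
  have hlen : 0 < (x :: t).length := by simp
  apply le_antisymm
  · obtain ⟨j, _, hj2, hj3⟩ := pv_menorEm_mem (x :: t) 0 (x :: t).length hlen (le_refl _)
    rw [hj3]
    exact pv_foldl_min_le t x _ (pv_getD_mem _ j hj2)
  · obtain ⟨j, hj1, hj2⟩ := pv_mem_getD (x :: t) _ (pv_foldl_min_mem t x)
    rw [← hj2]
    exact pv_menorEm_le (x :: t) 0 (x :: t).length j (Nat.zero_le _) hj1 (le_refl _)
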